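-- pv_equiv track=rewrite | github.com/pfeaster/SyDNEy | sydney/main.py | comb_modify
-- ===== SOURCE A (Python) =====
-- def comb_modify(combinations_in):
--     new_combination_set=[]
--     for combination in combinations_in:
--         new_combinations=[combination]
--         for element in range(len(combination)):
--             if '~~' in combination[element]:
--                 varpos=combination[element].replace('~~','')
--                 varneg=combination[element].replace('~~','-')
--                 if len(new_combinations)==1:
--                     new_combinations=[]
--                     varposcomb=list(combination)
--                     varposcomb[element]=varpos
--                     new_combinations.append(varposcomb)
--                     varnegcomb=list(combination)
--                     varnegcomb[element]=varneg
--                     new_combinations.append(varnegcomb)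
--                 else:
--                     altered_combinations=[]
--                     for oldcombo in new_combinations:
--                         varposcomb=oldcombo
--                         varposcomb[element]=varpos
--                         altered_combinations.append(varposcomb.copy())
--                         varnegcomb=oldcombo
--                         varnegcomb[element]=varneg
--                         altered_combinations.append(varnegcomb.copy())
--                     new_combinations=altered_combinations
--         for combination in new_combinations:
--             new_combination_set.append(combination)
--     return new_combination_set
-- ===== SOURCE B (Python) =====
-- def comb_modify(combinations_in):
--     new_combination_set = []
--     for combination in combinations_in:
--         variants = [[]]
--         for element in combination:
--             if '~~' in element:
--                 options = [element.replace('~~', ''), element.replace('~~', '-')]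
--             else:
--                 options = [element]
--             variants = [v + [o] for v in variants for o in options]
--         new_combination_set.extend(variants)
--     return new_combination_set
-- ===== Notes on version B (the rewrite author's own statement) =====
-- stated objective: simpler
-- what changed: Instead of A's in-place doubling of full-length combination copies indexed by position (with a special case for the first '~~'), B builds each output combination element-by-element as the Cartesian product of per-position choice lists ([e] or [e without '~~', e with '-']), appending variants front-to-back.
import Mathlib
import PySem

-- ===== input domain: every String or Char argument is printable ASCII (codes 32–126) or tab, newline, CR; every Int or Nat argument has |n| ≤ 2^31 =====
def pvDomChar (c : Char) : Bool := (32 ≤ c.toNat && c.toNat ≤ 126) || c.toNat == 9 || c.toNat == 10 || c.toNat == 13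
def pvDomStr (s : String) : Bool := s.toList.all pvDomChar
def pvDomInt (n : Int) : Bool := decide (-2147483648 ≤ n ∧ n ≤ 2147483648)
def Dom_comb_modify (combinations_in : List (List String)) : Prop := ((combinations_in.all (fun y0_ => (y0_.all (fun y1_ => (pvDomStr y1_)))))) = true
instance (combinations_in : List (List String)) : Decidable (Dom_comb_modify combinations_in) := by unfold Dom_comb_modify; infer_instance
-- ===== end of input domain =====

-- B replaces A's in-place index-doubling over full-length copies by building each variant
-- element-by-element from per-position choices (objective: simpler; same cost).

-- ===== PORT A =====
-- body of A's inner `for element in range(len(combination))` loop, transliterated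
def combStepA (combination : List String) (new_combinations : List (List String))
    (element : Nat) : List (List String) :=
  let s := PySem.List.pyGetD combination (element : Int) ""
  if PySem.Str.isIn "~~" s then
    let varpos := PySem.Str.replace s "~~" ""
    let varneg := PySem.Str.replace s "~~" "-"
    if new_combinations.length == 1 then
      let varposcomb := combination.set element varpos
      let varnegcomb := combination.set element varneg
      [varposcomb, varnegcomb]
    else
      new_combinations.foldl (fun altered_combinations oldcombo =>
        -- varposcomb aliases oldcombo in Python; the appended .copy()s are oldcombo
        -- with position `element` set to varpos resp. varneg
        let varposcomb := oldcombo.set element varpos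
        let altered_combinations := altered_combinations ++ [varposcomb]
        let varnegcomb := varposcomb.set element varneg
        altered_combinations ++ [varnegcomb]) []
  else new_combinations

def comb_modify (combinations_in : List (List String)) : List (List String) :=
  combinations_in.foldl (fun new_combination_set combination =>
    let new_combinations :=
      (List.range combination.length).foldl (combStepA combination) [combination]
    new_combinations.foldl (fun acc c => acc ++ [c]) new_combination_set) []

-- ===== PORT B =====
-- body of B's `for element in combination` loop: extend every variant by each choice
def combStepB (variants : List (List String)) (element : String) : List (List String) :=
  let options :=
    if PySem.Str.isIn "~~" element then
      [PySem.Str.replace element "~~" "", PySem.Str.replace element "~~" "-"]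
    else [element]
  variants.flatMap (fun v => options.map (fun o => v ++ [o]))

def comb_modify_alt (combinations_in : List (List String)) : List (List String) :=
  combinations_in.foldl (fun new_combination_set combination =>
    new_combination_set ++ combination.foldl combStepB [[]]) []

-- ===== PRECONDITION & SPEC =====
def Spec_comb_modify (combinations_in : List (List String)) (out : List (List String)) : Prop := out = comb_modify_alt combinations_in
instance (combinations_in : List (List String)) (out : List (List String)) : Decidable (Spec_comb_modify combinations_in out) := by unfold Spec_comb_modify; infer_instance

-- ===== CLAIM (what is proved, stated in full; the proofs are below) =====
def Claim_equal_comb_modify : Prop := ∀ (combinations_in : List (List String)), Dom_comb_modify combinations_in → Spec_comb_modify combinations_in (comb_modify combinations_in)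

-- ===== LEMMAS AND PROOFS =====

theorem set_append_len {α : Type} (pre : List α) (e x : α) (rest : List α) :
    (pre ++ e :: rest).set pre.length x = pre ++ x :: rest := by
  induction pre with
  | nil => rfl
  | cons h t ih => simp [ih]

theorem getD_append_len (pre : List String) (e : String) (rest : List String) :
    (pre ++ e :: rest).getD pre.length "" = e := by
  induction pre with
  | nil => rfl
  | cons h t ih => simpa using ih

theorem combStepB_ne_nil (T : List (List String)) (e : String) (h : T ≠ []) :
    combStepB T e ≠ [] := by
  obtain ⟨v, T', rfl⟩ := List.exists_cons_of_ne_nil h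
  unfold combStepB
  by_cases hin : PySem.Str.isIn "~~" e = true
  · rw [if_pos hin]; simp
  · rw [if_neg hin]; simp

theorem mem_combStepB (T : List (List String)) (e : String) (v' : List String)
    (h : v' ∈ combStepB T e) : ∃ v ∈ T, ∃ o, v' = v ++ [o] := by
  unfold combStepB at h
  simp only [List.mem_flatMap, List.mem_map] at h
  obtain ⟨v, hv, o, _, rfl⟩ := h
  exact ⟨v, hv, o, rfl⟩

theorem combStepB_one (T : List (List String)) (pre : List String) (e : String)
    (h1 : T.length = 1 → T = [pre])
    (hlen : (combStepB T e).length = 1) : combStepB T e = [pre ++ [e]] := by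
  unfold combStepB at *
  by_cases hin : PySem.Str.isIn "~~" e
  · simp only [hin, if_pos] at hlen
    simp only [List.length_flatMap, List.length_map, List.map_const'] at hlen
    rcases T with _ | ⟨v, T'⟩
    · simp at hlen
    · simp at hlen
  · simp only [hin, Bool.false_eq_true, if_false] at *
    have hT : T.length = 1 := by
      simpa [List.length_flatMap, List.map_const'] using hlen
    rw [h1 hT]
    simp

-- rewriting A's per-old double-set over full lists as B's per-variant appends
theorem flatMap_set_eq (p n e : String) (rest : List String) (k : Nat)
    (T : List (List String)) (hlen : ∀ v ∈ T, v.length = k) :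
    (T.map (· ++ e :: rest)).flatMap (fun old => [old.set k p, old.set k n])
      = (T.flatMap (fun v => [v ++ [p], v ++ [n]])).map (· ++ rest) := by
  induction T with
  | nil => rfl
  | cons v T' ih =>
    have hv : v.length = k := hlen v (by simp)
    simp only [List.map_cons, List.flatMap_cons]
    rw [ih (fun w hw => hlen w (by simp [hw]))]
    subst hv
    rw [set_append_len, set_append_len]
    simp

-- A's state after processing the positions of `pre` is B's state with the untouched
-- suffix still appended to every variant.
theorem inner_gen (rest : List String) : ∀ (pre : List String) (T : List (List String)),
    T ≠ [] → (∀ v ∈ T, v.length = pre.length) → (T.length = 1 → T = [pre]) →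
    (List.range' pre.length rest.length).foldl (combStepA (pre ++ rest))
      (T.map (· ++ rest)) = rest.foldl combStepB T := by
  induction rest with
  | nil => intro pre T _ _ _; simp
  | cons e rest ih =>
    intro pre T hne hlen h1
    rw [List.length_cons, List.range'_succ, List.foldl_cons]
    have hstep : combStepA (pre ++ e :: rest) (T.map (· ++ e :: rest)) pre.length
        = (combStepB T e).map (· ++ rest) := by
      unfold combStepA combStepB
      have hs : PySem.List.pyGetD (pre ++ e :: rest) ((pre.length : Nat) : Int) "" = e := by
        rw [PySem.List.pyGetD_natCast, getD_append_len]
      rw [hs]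
      by_cases hin : PySem.Str.isIn "~~" e
      · simp only [hin, if_pos]
        by_cases hone : T.length = 1
        · have hT : T = [pre] := h1 hone
          subst hT
          have h1' : ((([pre].map (· ++ e :: rest)).length == 1) = true) := by simp
          rw [h1']
          simp
        · have h1' : (((T.map (· ++ e :: rest)).length == 1) = false) := by
            simp only [List.length_map, beq_eq_false_iff_ne, ne_eq]
            exact hone
          rw [h1']
          simp only [Bool.false_eq_true, if_false, List.set_set, List.append_assoc,
            List.singleton_append]
          rw [PySem.List.foldl_append_eq_flatMap
            (fun oldcombo => [oldcombo.set pre.length (PySem.Str.replace e "~~" ""),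
                              oldcombo.set pre.length (PySem.Str.replace e "~~" "-")])
            (T.map (· ++ e :: rest)) []]
          rw [List.nil_append, flatMap_set_eq _ _ _ _ _ _ hlen]
          simp [List.map_flatMap]
      · simp only [hin, Bool.false_eq_true, if_false]
        have hsing : ∀ (U : List (List String)),
            U.map (fun x => x ++ e :: rest)
              = (U.flatMap (fun v => [v ++ [e]])).map (fun x => x ++ rest) := by
          intro U; induction U <;> simp_all
        exact hsing T
    rw [hstep]
    have hpe : pre ++ e :: rest = (pre ++ [e]) ++ rest := by simp
    have hlen' : pre.length + 1 = (pre ++ [e]).length := by simp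
    rw [hpe, hlen']
    apply ih (pre ++ [e]) (combStepB T e) (combStepB_ne_nil T e hne)
    · intro v' hv'
      obtain ⟨v, hv, o, rfl⟩ := mem_combStepB T e v' hv'
      simp [hlen v hv]
    · exact combStepB_one T pre e h1

theorem inner_eq (comb : List String) :
    (List.range comb.length).foldl (combStepA comb) [comb] = comb.foldl combStepB [[]] := by
  have h := inner_gen comb [] [[]] (by simp) (by simp) (by simp)
  simpa [List.range_eq_range'] using h

theorem outer_gen (xs : List (List String)) : ∀ (acc : List (List String)),
    xs.foldl (fun s comb =>
      ((List.range comb.length).foldl (combStepA comb) [comb]).foldl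
        (fun a c => a ++ [c]) s) acc
      = xs.foldl (fun s comb => s ++ comb.foldl combStepB [[]]) acc := by
  induction xs with
  | nil => intro acc; rfl
  | cons c t ih =>
    intro acc
    simp only [List.foldl_cons]
    rw [PySem.List.foldl_append_singleton, inner_eq c]
    exact ih _

-- ===== VERDICT (by name: the statement is the Claim_ definition above) =====
theorem comb_modify_spec : Claim_equal_comb_modify := by
  intro xs _
  unfold Spec_comb_modify comb_modify comb_modify_alt
  exact outer_gen xs []
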